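-- pv_equiv track=rewrite | github.com/jayasurya-n/Contests | GFG_Contest/GFG_Weekly_164/q4.py | sumofItems
-- ===== SOURCE A (Python) =====
-- from typing import List,Optional
--
-- def sumofItems(n : int, prices : List[int], q : int, queries : List[List[int]]) -> List[int]:
--     freq = dict()
--     add = 0
--     for i in prices:
--         freq[i] = freq.get(i,0)+1
--
--     totalSum = sum(prices)
--     ans = []
--     for i in range(q):
--         if(queries[i][0]==1):
--             totalSum+=n*queries[i][1]
--             add+=queries[i][1]
--         else:
--             x = queries[i][1]
--             y = queries[i][2]
--
--             totalSum-= freq.get(x-add,0)*x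
--             totalSum+= freq.get(x-add,0)*y
--
--             freq[y-add] = freq.get(y-add,0) + freq.get(x-add,0)
--             freq[x-add] = 0
--         ans.append(totalSum)
--     return ans
--
--
--
--
--
--
--
--     return ans
-- ===== SOURCE B (Python) =====
-- def sumofItems(n, prices, q, queries):
--     # Two staged passes: pass 1 walks the query slice and records only each query's
--     # sum DELTA (freq keyed by the actual current value, rebuilt on add-to-all);
--     # pass 2 turns the delta list into running totals with one accumulate loop.
--     freq = {}
--     for p in prices:
--         freq[p] = freq.get(p, 0) + 1
--     deltas = []
--     for qu in queries[:max(q, 0)]: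
--         if qu[0] == 1:
--             d = qu[1]
--             deltas.append(n * d)
--             freq = {k + d: c for k, c in freq.items()}
--         else:
--             x, y = qu[1], qu[2]
--             cnt = freq.get(x, 0)
--             deltas.append(cnt * (y - x))
--             freq[y] = freq.get(y, 0) + cnt
--             freq[x] = 0
--     ans = []
--     total = sum(prices)
--     for d in deltas:
--         total += d
--         ans.append(total)
--     return ans
-- ===== Notes on version B (the rewrite author's own statement) =====
-- stated objective: alternative
-- what changed: B replaces A's single stateful loop over indices with two staged passes: pass one walks the query slice keeping a frequency map keyed by the actual current value (rebuilt by shifting keys on an add-to-all query, no running add offset) and records only each query's sum delta; pass two accumulates the delta list into the running totals.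
import Mathlib
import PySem

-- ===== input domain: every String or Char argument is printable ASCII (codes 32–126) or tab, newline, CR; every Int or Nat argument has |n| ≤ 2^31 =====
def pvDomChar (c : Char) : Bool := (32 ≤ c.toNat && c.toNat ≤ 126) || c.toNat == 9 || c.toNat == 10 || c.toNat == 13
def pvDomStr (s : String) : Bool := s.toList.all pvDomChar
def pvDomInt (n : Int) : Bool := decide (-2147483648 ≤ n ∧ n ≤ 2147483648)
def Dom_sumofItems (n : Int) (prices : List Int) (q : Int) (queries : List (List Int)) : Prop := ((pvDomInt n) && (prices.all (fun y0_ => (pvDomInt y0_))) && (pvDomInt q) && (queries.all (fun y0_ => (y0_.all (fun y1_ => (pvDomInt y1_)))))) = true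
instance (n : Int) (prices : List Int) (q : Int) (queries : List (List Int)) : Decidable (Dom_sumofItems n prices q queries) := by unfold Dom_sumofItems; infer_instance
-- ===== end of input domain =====

-- B replaces A's single stateful loop with two staged passes: one pass records each query's
-- sum delta (freq keyed by the actual value, rebuilt on add-to-all), one pass accumulates them.

-- ===== PORT A =====
-- one iteration of A's query loop, applied to the current query list queries[i]
def pvStepA (n : Int) (st : PySem.Dict Int Int × Int × Int × List Int) (qi : List Int) :
    PySem.Dict Int Int × Int × Int × List Int :=
  let freq := st.1; let add := st.2.1; let totalSum := st.2.2.1; let ans := st.2.2.2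
  if ((PySem.List.pyGet? qi 0).getD 0 == 1) then
    let t := totalSum + n * (PySem.List.pyGet? qi 1).getD 0
    (freq, add + (PySem.List.pyGet? qi 1).getD 0, t, ans ++ [t])
  else
    let x := (PySem.List.pyGet? qi 1).getD 0
    let y := (PySem.List.pyGet? qi 2).getD 0
    let t := totalSum - freq.getD (x - add) 0 * x + freq.getD (x - add) 0 * y
    ((freq.insert (y - add) (freq.getD (y - add) 0 + freq.getD (x - add) 0)).insert (x - add) 0,
     add, t, ans ++ [t])

def sumofItems (n : Int) (prices : List Int) (q : Int) (queries : List (List Int)) : List Int :=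
  ((PySem.List.pyRange 0 q 1).foldl
      (fun st i => pvStepA n st ((PySem.List.pyGet? queries i).getD []))
      (prices.foldl (fun d i => d.insert i (d.getD i 0 + 1)) PySem.Dict.empty,
       0, prices.sum, [])).2.2.2

-- ===== PORT B =====
-- pass 1's body: state is only (freq keyed by actual value, list of deltas)
def pvStepB (n : Int) (st : PySem.Dict Int Int × List Int) (qu : List Int) :
    PySem.Dict Int Int × List Int :=
  let freq := st.1; let deltas := st.2
  if ((PySem.List.pyGet? qu 0).getD 0 == 1) then
    let d := (PySem.List.pyGet? qu 1).getD 0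
    -- freq = {k + d: c for k, c in freq.items()}
    (freq.items.foldl (fun e p => e.insert (p.1 + d) p.2) PySem.Dict.empty, deltas ++ [n * d])
  else
    let x := (PySem.List.pyGet? qu 1).getD 0
    let y := (PySem.List.pyGet? qu 2).getD 0
    let cnt := freq.getD x 0
    ((freq.insert y (freq.getD y 0 + cnt)).insert x 0, deltas ++ [cnt * (y - x)])

def sumofItems_alt (n : Int) (prices : List Int) (q : Int) (queries : List (List Int)) : List Int :=
  let deltas :=
    ((PySem.List.slice queries none (some (max q 0))).foldl (pvStepB n)
      (prices.foldl (fun d p => d.insert p (d.getD p 0 + 1)) PySem.Dict.empty, [])).2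
  -- pass 2: accumulate the deltas into running totals
  (deltas.foldl (fun (st : Int × List Int) d => (st.1 + d, st.2 ++ [st.1 + d]))
      (prices.sum, [])).2

-- ===== PRECONDITION & SPEC =====
-- Pre_ excludes exactly the inputs where Python A raises IndexError: an index i < q beyond
-- queries, a query without its opcode, a type-1 query shorter than 2 or another shorter than 3.
def Pre_sumofItems (n : Int) (prices : List Int) (q : Int) (queries : List (List Int)) : Prop :=
  q ≤ (queries.length : Int) ∧
    ∀ qu ∈ queries.take q.toNat, 2 ≤ qu.length ∧ (qu.headI ≠ 1 → 3 ≤ qu.length)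
instance (n : Int) (prices : List Int) (q : Int) (queries : List (List Int)) : Decidable (Pre_sumofItems n prices q queries) := by unfold Pre_sumofItems; infer_instance

def pvWitness_sumofItems : Int × List Int × Int × List (List Int) :=
  (3, [1, 2, 2], 3, [[1, 5], [2, 7, 9], [2, 9, 9]])

def Spec_sumofItems (n : Int) (prices : List Int) (q : Int) (queries : List (List Int)) (out : List Int) : Prop := out = sumofItems_alt n prices q queries
instance (n : Int) (prices : List Int) (q : Int) (queries : List (List Int)) (out : List Int) : Decidable (Spec_sumofItems n prices q queries out) := by unfold Spec_sumofItems; infer_instance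

-- ===== CLAIM (what is proved, stated in full; the proofs are below) =====
def Claim_equal_sumofItems : Prop := ∀ (n : Int) (prices : List Int) (q : Int) (queries : List (List Int)), Dom_sumofItems n prices q queries → Pre_sumofItems n prices q queries → Spec_sumofItems n prices q queries (sumofItems n prices q queries)


-- ===== LEMMAS AND PROOFS =====

-- B's dict is A's dict with every key shifted by the running add
def pvShift (a : Int) (d : PySem.Dict Int Int) : PySem.Dict Int Int :=
  PySem.Dict.mk (d.items.map (fun p => (p.1 + a, p.2)))

theorem pvShift_get? (a : Int) (d : PySem.Dict Int Int) (x : Int) :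
    (pvShift a d).get? x = d.get? (x - a) := by
  obtain ⟨l⟩ := d
  induction l with
  | nil => rfl
  | cons p rest ih =>
      obtain ⟨k, v⟩ := p
      show (PySem.Dict.mk ((k + a, v) :: rest.map _)).get? x = _
      rw [PySem.Dict.get?_mk_cons, PySem.Dict.get?_mk_cons]
      have : (k + a == x) = (k == x - a) := by
        by_cases h : k = x - a
        · simp [h, show k + a = x by omega]
        · simp [h, show k + a ≠ x by omega]
      rw [this]
      split
      · rfl
      · exact ih

theorem pvShift_getD (a : Int) (d : PySem.Dict Int Int) (x d0 : Int) :
    (pvShift a d).getD x d0 = d.getD (x - a) d0 := by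
  rw [PySem.Dict.getD_eq_get?_getD, PySem.Dict.getD_eq_get?_getD, pvShift_get?]

theorem pvShift_contains (a : Int) (d : PySem.Dict Int Int) (x : Int) :
    (pvShift a d).contains x = d.contains (x - a) := by
  rw [PySem.Dict.contains_eq_isSome_get?, PySem.Dict.contains_eq_isSome_get?, pvShift_get?]

theorem pvShift_keys (a : Int) (d : PySem.Dict Int Int) :
    (pvShift a d).keys = d.keys.map (· + a) := by
  show (d.items.map _).map _ = (d.items.map _).map _
  simp [List.map_map, Function.comp_def]

theorem pvShift_nodup (a : Int) (d : PySem.Dict Int Int) (h : d.keys.Nodup) :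
    (pvShift a d).keys.Nodup := by
  rw [pvShift_keys]
  exact h.map (fun x y hxy => by omega)

theorem pvShift_insert (a : Int) (d : PySem.Dict Int Int) (k : Int) (v : Int) :
    pvShift a (d.insert k v) = (pvShift a d).insert (k + a) v := by
  apply PySem.Dict.ext
  show (d.insert k v).items.map _ = ((pvShift a d).insert (k + a) v).items
  rw [PySem.Dict.items_insert, PySem.Dict.items_insert, pvShift_contains]
  have hka : k + a - a = k := by omega
  rw [hka]
  split
  · show _ = List.map _ (d.items.map _)
    rw [List.map_map, List.map_map]
    refine List.map_congr_left (fun p _ => ?_)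
    simp only [Function.comp_apply]
    have : (p.1 + a == k + a) = (p.1 == k) := by
      by_cases h : p.1 = k
      · simp [h]
      · simp [h, show p.1 + a ≠ k + a by omega]
    rw [this]
    by_cases h : (p.1 == k) = true <;> simp [h]
  · show List.map _ (d.items ++ [(k, v)]) = _
    simp [pvShift]

theorem pvShift_zero (d : PySem.Dict Int Int) : pvShift 0 d = d := by
  apply PySem.Dict.ext
  show d.items.map _ = d.items
  simp

theorem pvShift_shift (a b : Int) (d : PySem.Dict Int Int) :
    pvShift b (pvShift a d) = pvShift (a + b) d := by
  apply PySem.Dict.ext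
  show (d.items.map _).map _ = d.items.map _
  rw [List.map_map]
  exact List.map_congr_left (fun p _ => by simp [Function.comp_apply, add_assoc])

-- the dict-comprehension rebuild of B IS the shift of the whole dict
theorem pvRebuild_eq_shift (a : Int) (d : PySem.Dict Int Int) (h : d.keys.Nodup) :
    d.items.foldl (fun e p => e.insert (p.1 + a) p.2) PySem.Dict.empty = pvShift a d := by
  apply PySem.Dict.ext
  rw [PySem.Dict.items_foldl_insert_fresh d.items (fun p => p.1 + a) (fun p => p.2)
        PySem.Dict.empty (fun p _ => PySem.Dict.contains_empty _) ?_]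
  · show PySem.Dict.empty.items ++ _ = _
    rfl
  · have : d.items.map (fun p => p.1 + a) = d.keys.map (· + a) := by
      show _ = (d.items.map _).map _
      simp [List.map_map, Function.comp_def]
    rw [this]
    exact h.map (fun x y hxy => by omega)

-- B's pass-1 fold: the delta accumulator only collects appends
theorem pvStepB_append (n : Int) (l : List (List Int)) (f : PySem.Dict Int Int) (ds : List Int) :
    l.foldl (pvStepB n) (f, ds)
      = ((l.foldl (pvStepB n) (f, [])).1, ds ++ (l.foldl (pvStepB n) (f, [])).2) := by
  induction l generalizing f ds with
  | nil => simp
  | cons qu rest ih =>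
      rw [List.foldl_cons, List.foldl_cons]
      by_cases hc : ((PySem.List.pyGet? qu 0).getD 0 == 1) = true
      · simp only [pvStepB, if_pos hc]
        rw [ih]
        conv_rhs => rw [ih]
        simp
      · simp only [pvStepB, if_neg hc]
        rw [ih]
        conv_rhs => rw [ih]
        simp

-- main invariant: A's emitted totals are the accumulation of B's deltas,
-- provided B's dict is the add-shift of A's
theorem pvLoop_agree (n : Int) (l : List (List Int)) (dA : PySem.Dict Int Int)
    (add t : Int) (ans : List Int) (hnd : dA.keys.Nodup) :
    (l.foldl (pvStepA n) (dA, add, t, ans)).2.2.2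
      = (((l.foldl (pvStepB n) (pvShift add dA, [])).2).foldl
          (fun (st : Int × List Int) d => (st.1 + d, st.2 ++ [st.1 + d])) (t, ans)).2 := by
  induction l generalizing dA add t ans with
  | nil => rfl
  | cons qu rest ih =>
      rw [List.foldl_cons, List.foldl_cons]
      by_cases hc : ((PySem.List.pyGet? qu 0).getD 0 == 1) = true
      · -- type-1 query
        set d := (PySem.List.pyGet? qu 1).getD 0 with hd
        have hA : pvStepA n (dA, add, t, ans) qu
            = (dA, add + d, t + n * d, ans ++ [t + n * d]) := by
          simp only [pvStepA, if_pos hc]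
          rfl
        have hB : pvStepB n (pvShift add dA, []) qu = (pvShift (add + d) dA, [n * d]) := by
          simp only [pvStepB, if_pos hc]
          rw [← hd, pvRebuild_eq_shift _ _ (pvShift_nodup _ _ hnd), pvShift_shift]
          rfl
        rw [hA, hB, pvStepB_append n rest (pvShift (add + d) dA) [n * d]]
        rw [List.foldl_append]
        exact ih dA (add + d) (t + n * d) (ans ++ [t + n * d]) hnd
      · -- type-2 query
        set x := (PySem.List.pyGet? qu 1).getD 0 with hx
        set y := (PySem.List.pyGet? qu 2).getD 0 with hy
        set c := dA.getD (x - add) 0 with hcint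
        set dA' := (dA.insert (y - add) (dA.getD (y - add) 0 + c)).insert (x - add) 0 with hdA'
        have hA : pvStepA n (dA, add, t, ans) qu
            = (dA', add, t - c * x + c * y, ans ++ [t - c * x + c * y]) := by
          simp only [pvStepA, if_neg hc]
          rw [← hx, ← hy, ← hcint, ← hdA']
        have hB : pvStepB n (pvShift add dA, []) qu
            = (pvShift add dA', [c * (y - x)]) := by
          simp only [pvStepB, if_neg hc]
          rw [← hx, ← hy]
          refine Prod.ext ?_ ?_
          · show ((pvShift add dA).insert y
                ((pvShift add dA).getD y 0 + (pvShift add dA).getD x 0)).insert x 0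
              = pvShift add dA'
            rw [hdA', pvShift_insert, pvShift_insert, pvShift_getD, pvShift_getD]
            have h1 : y - add + add = y := by omega
            have h2 : x - add + add = x := by omega
            rw [h1, h2, ← hcint]
          · show ([] : List Int) ++ [(pvShift add dA).getD x 0 * (y - x)] = [c * (y - x)]
            rw [pvShift_getD, ← hcint]
            rfl
        have hnd' : dA'.keys.Nodup :=
          PySem.Dict.nodup_keys_insert _ _ _ (PySem.Dict.nodup_keys_insert _ _ _ hnd)
        rw [hA, hB, pvStepB_append n rest (pvShift add dA') [c * (y - x)]]
        rw [List.foldl_append]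
        have hrw : (t + c * (y - x), ans ++ [t + c * (y - x)])
            = (t - c * x + c * y, ans ++ [t - c * x + c * y]) := by
          have : t + c * (y - x) = t - c * x + c * y := by ring
          rw [this]
        show _ = (((rest.foldl (pvStepB n) (pvShift add dA', [])).2).foldl _
            (t + c * (y - x), ans ++ [t + c * (y - x)])).2
        rw [hrw]
        exact ih dA' add (t - c * x + c * y) (ans ++ [t - c * x + c * y]) hnd'

-- under Pre_, A's indexed walk over range(q) reads exactly the prefix queries.take m
theorem pvIndexed_eq_take (queries : List (List Int)) (m : Nat) (hm : m ≤ queries.length) :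
    (PySem.List.pyRange 0 (m : Int) 1).map (fun i => (PySem.List.pyGet? queries i).getD [])
      = queries.take m := by
  induction m with
  | zero => rfl
  | succ k ih =>
      rw [show ((k + 1 : Nat) : Int) = (k : Int) + 1 by push_cast; ring]
      rw [show PySem.List.pyRange 0 ((k : Int) + 1) 1 = PySem.List.pyRange 0 (k : Int) 1 ++ [(k : Int)]
            from PySem.List.pyRange_one_succ_right (by omega),
          List.map_append, ih (by omega), List.take_succ]
      congr 1
      have : (PySem.List.pyGet? queries (k : Int)) = queries[k]? := by
        simp [PySem.List.pyGet?, PySem.List.pyIdx?, Nat.lt_of_succ_le hm]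
      simp [this, List.getElem?_eq_getElem (Nat.lt_of_succ_le hm)]

theorem pvFoldA_indexed (n : Int) (queries : List (List Int)) (m : Nat)
    (hm : m ≤ queries.length) (init : PySem.Dict Int Int × Int × Int × List Int) :
    (PySem.List.pyRange 0 (m : Int) 1).foldl
        (fun st i => pvStepA n st ((PySem.List.pyGet? queries i).getD [])) init
      = (queries.take m).foldl (pvStepA n) init := by
  rw [← pvIndexed_eq_take queries m hm, List.foldl_map]

theorem pvNodupFold (l : List Int) (d : PySem.Dict Int Int) (h : d.keys.Nodup) :
    (l.foldl (fun d p => d.insert p (d.getD p 0 + 1)) d).keys.Nodup := by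
  induction l generalizing d with
  | nil => exact h
  | cons p rest ih => exact ih _ (PySem.Dict.nodup_keys_insert _ _ _ h)

-- ===== VERDICT (by name: the statement is the Claim_ definition above) =====
theorem sumofItems_spec : Claim_equal_sumofItems := by
  intro n prices q queries _ hpre
  show sumofItems n prices q queries = sumofItems_alt n prices q queries
  unfold sumofItems sumofItems_alt
  have hlen := hpre.1
  have hmain := pvLoop_agree n (queries.take (max q 0).toNat)
      (prices.foldl (fun d p => d.insert p (d.getD p 0 + 1)) PySem.Dict.empty)
      0 prices.sum [] (pvNodupFold prices _ PySem.Dict.nodup_keys_empty)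
  rw [pvShift_zero] at hmain
  rw [PySem.List.slice_to queries (by omega)]
  by_cases h0 : 0 ≤ q
  · set m := (max q 0).toNat with hmdef
    have hq : q = (m : Int) := by omega
    have hm : m ≤ queries.length := by omega
    rw [hq, pvFoldA_indexed n queries m hm]
    exact hmain
  · rw [show PySem.List.pyRange 0 q 1 = [] by
          simp [PySem.List.pyRange, show ¬(0 : Int) < q by omega],
        show (max q 0).toNat = 0 by omega]
    rfl
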